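-- pv_equiv track=rewrite | github.com/Jean-Alet/saemath | sae0202.py | fc
-- ===== SOURCE A (Python) =====
-- def Trans2(M):
--     n = len(M)
--     for k in range(n):
--         for i in range(n):
--             for j in range(n):
--                 if M[i][k] and M[k][j]:
--                     M[i][j] = 1
--     return M
--
-- def fc(M):
--     A = Trans2(M)
--     n = len(M)
--     for i in range(n):
--         for j in range(n):
--             if A[i][j] == 0:
--                 return False
--     return True
-- ===== SOURCE B (Python) =====
-- def fc(M):
--     # Reachability check (two BFS from vertex 0) instead of Floyd-Warshall closure.
--     # Does not mutate M (A mutates it in place); return value only is matched.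
--     n = len(M)
--     if n == 0:
--         return True
--     if n == 1:
--         return M[0][0] != 0
--     def reaches_all(edge):
--         seen = [False] * n
--         seen[0] = True
--         frontier = [0]
--         count = 1
--         while frontier:
--             new = [v for v in range(n) if not seen[v] and any(edge(u, v) for u in frontier)]
--             for v in new:
--                 seen[v] = True
--             count += len(new)
--             frontier = new
--         return count == n
--     return (reaches_all(lambda u, v: M[u][v] != 0)
--             and reaches_all(lambda u, v: M[v][u] != 0))
-- ===== Notes on version B (the rewrite author's own statement) =====
-- stated objective: faster
-- what changed: Replaces the in-place O(n^3) Floyd-Warshall transitive-closure-then-scan by two O(n^2) BFS reachability sweeps from vertex 0 (forward and reverse edges) plus the n<=1 self-loop cases; B does not mutate M.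
import Mathlib
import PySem

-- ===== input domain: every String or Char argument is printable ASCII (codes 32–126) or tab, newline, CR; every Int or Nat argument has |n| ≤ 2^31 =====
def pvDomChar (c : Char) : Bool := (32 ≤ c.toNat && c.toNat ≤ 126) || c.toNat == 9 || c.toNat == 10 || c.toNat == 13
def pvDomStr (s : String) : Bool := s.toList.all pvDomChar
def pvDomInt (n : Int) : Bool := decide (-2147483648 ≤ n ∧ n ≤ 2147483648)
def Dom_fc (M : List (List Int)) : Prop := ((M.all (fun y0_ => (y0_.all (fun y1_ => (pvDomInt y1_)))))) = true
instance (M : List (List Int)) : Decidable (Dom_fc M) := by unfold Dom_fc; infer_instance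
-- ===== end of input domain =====

-- B replaces the O(n^3) in-place Floyd–Warshall closure by two O(n^2) BFS reachability
-- sweeps from vertex 0 (forward and reverse); equivalence is about the RETURN value only
-- (Python A mutates its argument in place, B does not).

-- ===== PORT A =====
-- M[i][j] read; indices produced by range(n) are nonnegative and (under Pre_fc) in range,
-- so they are ported as Nat indices with List.getD / List.set (exact there).
def pvGetM (A : List (List Int)) (i j : Nat) : Int := (A.getD i []).getD j 0

-- M[i][j] = 1
def pvSetM (A : List (List Int)) (i j : Nat) : List (List Int) :=
  A.set i ((A.getD i []).set j 1)

-- Trans2: triple loop 'for k: for i: for j: if M[i][k] and M[k][j]: M[i][j] = 1'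
def pvTrans2 (M : List (List Int)) : List (List Int) :=
  let n := M.length
  (List.range n).foldl (fun A k =>
    (List.range n).foldl (fun A i =>
      (List.range n).foldl (fun A j =>
        if pvGetM A i k ≠ 0 ∧ pvGetM A k j ≠ 0 then pvSetM A i j else A) A) A) M

def fc (M : List (List Int)) : Bool :=
  let A := pvTrans2 M
  let n := M.length
  (List.range n).all (fun i => (List.range n).all (fun j => !(pvGetM A i j == 0)))

-- ===== PORT B =====
-- new = [v for v in range(n) if not seen[v] and any(edge(u, v) for u in frontier)]
def pvNewFrontier (n : Nat) (edge : Nat → Nat → Bool) (seen : List Bool) (frontier : List Nat) : List Nat :=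
  (List.range n).filter (fun v => !(seen.getD v false) && frontier.any (fun u => edge u v))

-- the 'while frontier:' loop; fuel n always suffices (each non-final round grows seen)
def pvBfs (n : Nat) (edge : Nat → Nat → Bool) :
    Nat → List Bool → List Nat → Nat → Bool
  | 0, _, _, count => count == n
  | _ + 1, _, [], count => count == n
  | fuel + 1, seen, f :: fs, count =>
      let new := pvNewFrontier n edge seen (f :: fs)
      pvBfs n edge fuel (new.foldl (fun s v => s.set v true) seen) new (count + new.length)

def pvReachesAll (n : Nat) (edge : Nat → Nat → Bool) : Bool :=
  pvBfs n edge n ((List.replicate n false).set 0 true) [0] 1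

def fc_alt (M : List (List Int)) : Bool :=
  let n := M.length
  if n = 0 then true
  else if n = 1 then !(pvGetM M 0 0 == 0)
  else pvReachesAll n (fun u v => !(pvGetM M u v == 0)) &&
       pvReachesAll n (fun u v => !(pvGetM M v u == 0))

-- ===== PRECONDITION & SPEC =====
-- Pre_fc: every row at least as long as the matrix (Python A raises IndexError on M[i][k]
-- / M[k][j] for a shorter row; it returns normally on all other inputs).
def Pre_fc (M : List (List Int)) : Prop := ∀ row ∈ M, M.length ≤ row.length
instance (M : List (List Int)) : Decidable (Pre_fc M) := by unfold Pre_fc; infer_instance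

def pvWitness_fc : List (List Int) := [[0, 1], [1, 0]]

def Spec_fc (M : List (List Int)) (out : Bool) : Prop := out = fc_alt M
instance (M : List (List Int)) (out : Bool) : Decidable (Spec_fc M out) := by unfold Spec_fc; infer_instance

-- ===== CLAIM (what is proved, stated in full; the proofs are below) =====
def Claim_equal_fc : Prop := ∀ (M : List (List Int)), Dom_fc M → Pre_fc M → Spec_fc M (fc M)


-- ===== LEMMAS AND PROOFS =====

theorem pvset_getD_ne {α : Type} (l : List α) {i j : Nat} (v d : α) (h : i ≠ j) :
    (l.set i v).getD j d = l.getD j d := by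
  simp [List.getD_eq_getElem?_getD, List.getElem?_set_ne h]

theorem pvset_getD_self {α : Type} (l : List α) {i : Nat} (v d : α) (h : i < l.length) :
    (l.set i v).getD i d = v := by
  simp [List.getD_eq_getElem?_getD, h]

theorem pvrep_getD (n v : Nat) (b : Bool) : (List.replicate n b).getD v b = b := by
  rcases lt_or_ge v n with h | h
  · rw [List.getD_eq_getElem _ _ (by simpa using h)]; simp
  · exact List.getD_eq_default _ _ (by simpa using h)

-- the edge relation of M on vertices < len(M): a nonzero entry
def pvE (M : List (List Int)) (u v : Nat) : Prop := v < M.length ∧ pvGetM M u v ≠ 0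

theorem pvE_src_lt {M : List (List Int)} {u v : Nat} (h : pvGetM M u v ≠ 0) : u < M.length := by
  by_contra hc
  apply h
  unfold pvGetM
  rw [List.getD_eq_default _ _ (show M.length ≤ u by omega)]
  rfl

-- row-lengths shape invariant preserved by the Floyd-Warshall updates
def pvRL (M A : List (List Int)) : Prop :=
  A.length = M.length ∧ ∀ i, (A.getD i []).length = (M.getD i []).length

theorem pvGetM_set (A : List (List Int)) (i j p q : Nat) :
    pvGetM (pvSetM A i j) p q =
      if p = i ∧ q = j ∧ i < A.length ∧ j < (A.getD i []).length then 1 else pvGetM A p q := by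
  unfold pvGetM pvSetM
  by_cases hip : i < A.length
  · by_cases hp : p = i
    · subst hp
      rw [pvset_getD_self A _ _ hip]
      by_cases hq : q = j
      · subst hq
        by_cases hj : q < (A.getD p []).length
        · rw [pvset_getD_self _ _ _ hj, if_pos ⟨rfl, rfl, hip, hj⟩]
        · rw [List.set_eq_of_length_le (by omega), if_neg (by tauto)]
      · rw [pvset_getD_ne _ _ _ (fun h => hq h.symm), if_neg (by tauto)]
    · rw [pvset_getD_ne _ _ _ (fun h => hp h.symm), if_neg (by tauto)]
  · rw [List.set_eq_of_length_le (by omega), if_neg (by tauto)]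

theorem pvRL_set {M A : List (List Int)} (h : pvRL M A) (i j : Nat) : pvRL M (pvSetM A i j) := by
  obtain ⟨h1, h2⟩ := h
  constructor
  · simpa [pvSetM] using h1
  · intro p
    unfold pvSetM
    by_cases hip : i < A.length
    · by_cases hp : p = i
      · subst hp
        rw [pvset_getD_self A _ _ hip, List.length_set]
        exact h2 p
      · rw [pvset_getD_ne A _ _ (fun h => hp h.symm)]
        exact h2 p
    · rw [List.set_eq_of_length_le (by omega)]
      exact h2 p

theorem pvNZ_set_mono {A : List (List Int)} {p q : Nat} (i j : Nat)
    (h : pvGetM A p q ≠ 0) : pvGetM (pvSetM A i j) p q ≠ 0 := by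
  rw [pvGetM_set]; split_ifs with hc
  · simp
  · exact h

-- the three loop bodies of Trans2, named so the folds can be reasoned about
def pvStepJ (k i : Nat) (A : List (List Int)) (j : Nat) : List (List Int) :=
  if pvGetM A i k ≠ 0 ∧ pvGetM A k j ≠ 0 then pvSetM A i j else A

def pvStepI (n k : Nat) (A : List (List Int)) (i : Nat) : List (List Int) :=
  (List.range n).foldl (pvStepJ k i) A

def pvStepK (n : Nat) (A : List (List Int)) (k : Nat) : List (List Int) :=
  (List.range n).foldl (pvStepI n k) A

theorem pvTrans2_eq (M : List (List Int)) :
    pvTrans2 M = (List.range M.length).foldl (pvStepK M.length) M := rfl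

theorem foldl_pres_mem {α β : Type} (f : β → α → β) (P : β → Prop) :
    ∀ (l : List α) (b : β), (∀ b a, a ∈ l → P b → P (f b a)) → P b → P (l.foldl f b)
  | [], b, _, hb => hb
  | x :: xs, b, h, hb =>
      foldl_pres_mem f P xs (f b x) (fun b a ha => h b a (List.mem_cons_of_mem _ ha))
        (h b x (List.mem_cons_self) hb)

theorem pvNZ_stepJ_mono {A : List (List Int)} {p q : Nat} (k i j : Nat)
    (h : pvGetM A p q ≠ 0) : pvGetM (pvStepJ k i A j) p q ≠ 0 := by
  unfold pvStepJ; split_ifs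
  · exact pvNZ_set_mono i j h
  · exact h

theorem pvNZ_stepI_mono {A : List (List Int)} {p q : Nat} (n k i : Nat)
    (h : pvGetM A p q ≠ 0) : pvGetM (pvStepI n k A i) p q ≠ 0 :=
  foldl_pres_mem _ (fun A => pvGetM A p q ≠ 0) _ A
    (fun B j _ hB => pvNZ_stepJ_mono k i j hB) h

theorem pvNZ_stepK_mono {A : List (List Int)} {p q : Nat} (n k : Nat)
    (h : pvGetM A p q ≠ 0) : pvGetM (pvStepK n A k) p q ≠ 0 :=
  foldl_pres_mem _ (fun A => pvGetM A p q ≠ 0) _ A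
    (fun B i _ hB => pvNZ_stepI_mono n k i hB) h

theorem pvRL_stepJ {M A : List (List Int)} (h : pvRL M A) (k i j : Nat) : pvRL M (pvStepJ k i A j) := by
  unfold pvStepJ; split_ifs
  · exact pvRL_set h i j
  · exact h

theorem pvRL_stepI {M A : List (List Int)} (h : pvRL M A) (n k i : Nat) : pvRL M (pvStepI n k A i) :=
  foldl_pres_mem _ (pvRL M) _ A (fun B j _ hB => pvRL_stepJ hB k i j) h

theorem pvRL_stepK {M A : List (List Int)} (h : pvRL M A) (n k : Nat) : pvRL M (pvStepK n A k) :=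
  foldl_pres_mem _ (pvRL M) _ A (fun B i _ hB => pvRL_stepI hB n k i) h

-- ===== A-side soundness: every nonzero entry of the closure comes from a real path =====

def pvSound (M A : List (List Int)) : Prop :=
  ∀ p q, q < M.length → pvGetM A p q ≠ 0 → Relation.TransGen (pvE M) p q

theorem pvSound_stepJ {M A : List (List Int)} {k i j : Nat} (hk : k < M.length)
    (hj : j < M.length) (h : pvSound M A) : pvSound M (pvStepJ k i A j) := by
  unfold pvStepJ; split_ifs with hc
  · intro p q hq hnz
    rw [pvGetM_set] at hnz
    split_ifs at hnz with hpq
    · obtain ⟨hp, hq', _⟩ := hpq; subst hp; subst hq'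
      exact Relation.TransGen.trans (h p k hk hc.1) (h k q hq hc.2)
    · exact h p q hq hnz
  · exact h

theorem pvSound_stepI {M A : List (List Int)} {k : Nat} (hk : k < M.length)
    (h : pvSound M A) : pvSound M (pvStepI M.length k A i) :=
  foldl_pres_mem _ (pvSound M) _ A
    (fun B j hj hB => pvSound_stepJ hk (List.mem_range.mp hj) hB) h

theorem pvSound_stepK {M A : List (List Int)} {k : Nat} (hk : k < M.length)
    (h : pvSound M A) : pvSound M (pvStepK M.length A k) :=
  foldl_pres_mem _ (pvSound M) _ A
    (fun B i hi hB => pvSound_stepI hk hB) h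

theorem pvSound_trans2 (M : List (List Int)) : pvSound M (pvTrans2 M) := by
  rw [pvTrans2_eq]
  exact foldl_pres_mem _ (pvSound M) _ M
    (fun B k hk hB => pvSound_stepK (List.mem_range.mp hk) hB)
    (fun p q hq hnz => Relation.TransGen.single ⟨hq, hnz⟩)

-- ===== A-side completeness: paths with bounded intermediate vertices =====

inductive pvBP (M : List (List Int)) : Nat → Nat → Nat → Prop where
  | edge {b i j : Nat} : pvE M i j → pvBP M b i j
  | comp {b i k j : Nat} : k < b → pvBP M b i k → pvBP M b k j → pvBP M b i j

theorem pvBP_split {M : List (List Int)} {b i j : Nat} (h : pvBP M (b + 1) i j) :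
    pvBP M b i j ∨ (pvBP M b i b ∧ pvBP M b b j) := by
  generalize hb : b + 1 = b1 at h
  revert hb
  induction h with
  | edge he => exact fun _ => Or.inl (pvBP.edge he)
  | comp hk hl hr ihl ihr =>
    intro hb
    rename_i i2 k2 j2
    by_cases hkb : k2 = b
    · subst hkb
      refine Or.inr ⟨?_, ?_⟩
      · rcases ihl hb with h | ⟨h, _⟩ <;> exact h
      · rcases ihr hb with h | ⟨_, h⟩ <;> exact h
    · have hk' : k2 < b := by omega
      rcases ihl hb with hl' | ⟨hl1, hl2⟩
      · rcases ihr hb with hr' | ⟨hr1, hr2⟩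
        · exact Or.inl (pvBP.comp hk' hl' hr')
        · exact Or.inr ⟨pvBP.comp hk' hl' hr1, hr2⟩
      · rcases ihr hb with hr' | ⟨hr1, hr2⟩
        · exact Or.inr ⟨hl1, pvBP.comp hk' hl2 hr'⟩
        · exact Or.inr ⟨hl1, hr2⟩

theorem transGen_to_pvBP {M : List (List Int)} {i j : Nat}
    (h : Relation.TransGen (pvE M) i j) : pvBP M M.length i j := by
  induction h with
  | single he => exact pvBP.edge he
  | tail _ he ih =>
    rename_i k j'
    exact pvBP.comp (pvE_src_lt he.2) ih (pvBP.edge he)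

theorem pvrow_len {M : List (List Int)} (hPre : Pre_fc M) {i : Nat} (hi : i < M.length) :
    M.length ≤ (M.getD i []).length := by
  rw [List.getD_eq_getElem _ _ hi]
  exact hPre _ (List.getElem_mem hi)

-- inner loops actually set the entry whose update condition holds
theorem pvStepI_sets {M : List (List Int)} (hPre : Pre_fc M) {A : List (List Int)} {k i j : Nat}
    (hRL : pvRL M A) (hi : i < M.length) (hj : j < M.length)
    (hik : pvGetM A i k ≠ 0) (hkj : pvGetM A k j ≠ 0) :
    pvGetM (pvStepI M.length k A i) i j ≠ 0 := by
  have main : ∀ (l : List Nat) (A : List (List Int)), pvRL M A → j ∈ l →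
      pvGetM A i k ≠ 0 → pvGetM A k j ≠ 0 → pvGetM (l.foldl (pvStepJ k i) A) i j ≠ 0 := by
    intro l
    induction l with
    | nil => intro A _ hj' _ _; cases hj'
    | cons x xs ih =>
      intro A hRL hjl hik hkj
      by_cases hx : j ∈ xs
      · exact ih _ (pvRL_stepJ hRL k i x) hx (pvNZ_stepJ_mono k i x hik)
          (pvNZ_stepJ_mono k i x hkj)
      · have hxj : x = j := by
          rcases List.mem_cons.mp hjl with h | h
          · exact h.symm
          · exact absurd h hx
        subst hxj
        have hset : pvGetM (pvStepJ k i A x) i x ≠ 0 := by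
          unfold pvStepJ
          rw [if_pos ⟨hik, hkj⟩, pvGetM_set,
            if_pos ⟨rfl, rfl, by rw [hRL.1]; exact hi,
              by rw [hRL.2 i]; exact lt_of_lt_of_le hj (pvrow_len hPre hi)⟩]
          exact one_ne_zero
        simp only [List.foldl_cons]
        exact foldl_pres_mem _ (fun B => pvGetM B i x ≠ 0) xs _
          (fun B a _ hB => pvNZ_stepJ_mono k i a hB) hset
  exact main _ A hRL (List.mem_range.mpr hj) hik hkj

theorem pvStepK_sets {M : List (List Int)} (hPre : Pre_fc M) {A : List (List Int)} {k i j : Nat}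
    (hRL : pvRL M A) (hi : i < M.length) (hj : j < M.length)
    (hik : pvGetM A i k ≠ 0) (hkj : pvGetM A k j ≠ 0) :
    pvGetM (pvStepK M.length A k) i j ≠ 0 := by
  have main : ∀ (l : List Nat) (A : List (List Int)), pvRL M A → i ∈ l →
      pvGetM A i k ≠ 0 → pvGetM A k j ≠ 0 →
      pvGetM (l.foldl (pvStepI M.length k) A) i j ≠ 0 := by
    intro l
    induction l with
    | nil => intro A _ hi' _ _; cases hi'
    | cons x xs ih =>
      intro A hRL hil hik hkj
      by_cases hx : i ∈ xs
      · exact ih _ (pvRL_stepI hRL M.length k x) hx (pvNZ_stepI_mono M.length k x hik)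
          (pvNZ_stepI_mono M.length k x hkj)
      · have hxi : x = i := by
          rcases List.mem_cons.mp hil with h | h
          · exact h.symm
          · exact absurd h hx
        subst hxi
        have hset : pvGetM (pvStepI M.length k A x) x j ≠ 0 :=
          pvStepI_sets hPre hRL hi hj hik hkj
        simp only [List.foldl_cons]
        exact foldl_pres_mem _ (fun B => pvGetM B x j ≠ 0) xs _
          (fun B a _ hB => pvNZ_stepI_mono M.length k a hB) hset
  exact main _ A hRL (List.mem_range.mpr hi) hik hkj

theorem pvOuter_complete {M : List (List Int)} (hPre : Pre_fc M) :
    ∀ K, K ≤ M.length →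
      pvRL M ((List.range K).foldl (pvStepK M.length) M) ∧
      (∀ i j, i < M.length → j < M.length → pvBP M K i j →
        pvGetM ((List.range K).foldl (pvStepK M.length) M) i j ≠ 0) := by
  intro K
  induction K with
  | zero =>
    intro _
    refine ⟨⟨rfl, fun _ => rfl⟩, ?_⟩
    intro i j hi hj hbp
    cases hbp with
    | edge he => exact he.2
    | comp hk _ _ => omega
  | succ K ih =>
    intro hK
    obtain ⟨ihRL, ihC⟩ := ih (by omega)
    rw [List.range_succ, List.foldl_append]
    set A := (List.range K).foldl (pvStepK M.length) M with hA
    simp only [List.foldl_cons, List.foldl_nil]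
    refine ⟨pvRL_stepK ihRL M.length K, ?_⟩
    intro i j hi hj hbp
    rcases pvBP_split hbp with h | ⟨h1, h2⟩
    · exact pvNZ_stepK_mono M.length K (ihC i j hi hj h)
    · have hKn : K < M.length := by omega
      exact pvStepK_sets hPre ihRL hi hj (ihC i K hi hKn h1) (ihC K j hKn hj h2)

theorem pvFW_iff {M : List (List Int)} (hPre : Pre_fc M) {i j : Nat}
    (hi : i < M.length) (hj : j < M.length) :
    pvGetM (pvTrans2 M) i j ≠ 0 ↔ Relation.TransGen (pvE M) i j := by
  constructor
  · exact pvSound_trans2 M i j hj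
  · intro h
    have := (pvOuter_complete hPre M.length (le_refl _)).2 i j hi hj (transGen_to_pvBP h)
    rw [pvTrans2_eq]
    exact this

-- ===== B-side: BFS characterization =====

def pvR (n : Nat) (edge : Nat → Nat → Bool) (u v : Nat) : Prop := v < n ∧ edge u v = true

def pvInvB (n : Nat) (edge : Nat → Nat → Bool) (seen : List Bool) (frontier : List Nat) (count : Nat) : Prop :=
  seen.length = n ∧ count = seen.count true ∧ seen.getD 0 false = true ∧
  (∀ u ∈ frontier, seen.getD u false = true) ∧
  (∀ v, seen.getD v false = true → Relation.ReflTransGen (pvR n edge) 0 v) ∧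
  (∀ u, seen.getD u false = true → u ∉ frontier → ∀ v, pvR n edge u v → seen.getD v false = true)

theorem count_full_all {seen : List Bool} (h : seen.count true = seen.length) {v : Nat}
    (hv : v < seen.length) : seen.getD v false = true := by
  have := (List.count_eq_length).mp h
  rw [List.getD_eq_getElem?_getD, List.getElem?_eq_getElem hv]
  exact (this _ (List.getElem_mem hv)).symm

theorem all_count_full {seen : List Bool} (h : ∀ v < seen.length, seen.getD v false = true) :
    seen.count true = seen.length := by
  apply List.count_eq_length.mpr
  intro b hb
  obtain ⟨i, hi, rfl⟩ := List.mem_iff_getElem.mp hb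
  have := h i hi
  rw [List.getD_eq_getElem?_getD, List.getElem?_eq_getElem hi] at this
  exact this.symm

theorem count_set_true (seen : List Bool) (v : Nat) (hv : v < seen.length)
    (hf : seen.getD v false = false) :
    (seen.set v true).count true = seen.count true + 1 := by
  induction seen generalizing v with
  | nil => cases hv
  | cons b t ih =>
    cases v with
    | zero =>
      have : b = false := by simpa using hf
      subst this
      simp [List.count_cons]
    | succ w =>
      have h1 : (t.set w true).count true = t.count true + 1 :=
        ih w (by simpa using hv) (by simpa using hf)
      simp [List.count_cons, h1]
      omega

theorem foldl_set_true (new : List Nat) :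
    ∀ (seen : List Bool), new.Nodup → (∀ v ∈ new, seen.getD v false = false) →
    (∀ v ∈ new, v < seen.length) →
    (new.foldl (fun s v => s.set v true) seen).count true = seen.count true + new.length ∧
    (new.foldl (fun s v => s.set v true) seen).length = seen.length ∧
    (∀ v, (new.foldl (fun s v => s.set v true) seen).getD v false = true ↔
      seen.getD v false = true ∨ v ∈ new) := by
  induction new with
  | nil => intro seen _ _ _; exact ⟨by simp, rfl, by simp⟩
  | cons x xs ih =>
    intro seen hnd hf hlt
    have hx : x < seen.length := hlt x List.mem_cons_self
    have hxf : seen.getD x false = false := hf x List.mem_cons_self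
    have hnd' : xs.Nodup := (List.nodup_cons.mp hnd).2
    have hxns : x ∉ xs := (List.nodup_cons.mp hnd).1
    have hgd : ∀ v, (seen.set x true).getD v false = if v = x then true else seen.getD v false := by
      intro v
      by_cases hvx : v = x
      · subst hvx
        rw [if_pos rfl]
        exact pvset_getD_self seen _ _ hx
      · rw [if_neg hvx, pvset_getD_ne seen _ _ (fun h => hvx h.symm)]
    have hfresh2 : ∀ v ∈ xs, (seen.set x true).getD v false = false := by
      intro v hv
      have hvx : v ≠ x := fun h => hxns (h ▸ hv)
      rw [hgd v, if_neg hvx]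
      exact hf v (List.mem_cons_of_mem _ hv)
    have hlt2 : ∀ v ∈ xs, v < (seen.set x true).length := by
      intro v hv
      rw [List.length_set]
      exact hlt v (List.mem_cons_of_mem _ hv)
    obtain ⟨c1, c2, c3⟩ := ih (seen.set x true) hnd' hfresh2 hlt2
    refine ⟨?_, ?_, ?_⟩
    · simp only [List.foldl_cons]
      rw [c1, count_set_true seen x hx hxf]
      simp only [List.length_cons]
      omega
    · simp only [List.foldl_cons]
      rw [c2, List.length_set]
    · intro v
      simp only [List.foldl_cons]
      rw [c3 v, hgd v]
      by_cases hvx : v = x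
      · simp [hvx]
      · simp [hvx]

theorem pvNewFrontier_mem {n : Nat} {edge : Nat → Nat → Bool} {seen : List Bool}
    {frontier : List Nat} {v : Nat} :
    v ∈ pvNewFrontier n edge seen frontier ↔
      v < n ∧ seen.getD v false = false ∧ ∃ u ∈ frontier, edge u v = true := by
  simp only [pvNewFrontier, List.mem_filter, List.mem_range, Bool.and_eq_true,
    Bool.not_eq_true', List.any_eq_true]

theorem pvNewFrontier_nodup (n : Nat) (edge : Nat → Nat → Bool) (seen : List Bool)
    (frontier : List Nat) : (pvNewFrontier n edge seen frontier).Nodup :=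
  List.Nodup.filter _ (List.nodup_range)

theorem pvBfs_nil (n : Nat) (edge : Nat → Nat → Bool) (fuel : Nat) (seen : List Bool) (count : Nat) :
    pvBfs n edge fuel seen [] count = (count == n) := by
  cases fuel <;> rfl

-- with a fully closed seen set containing 0, count = n iff everything is reachable
theorem closed_iff {n : Nat} {edge : Nat → Nat → Bool} {seen : List Bool} {count : Nat}
    (hlen : seen.length = n) (hcount : count = seen.count true)
    (h0 : seen.getD 0 false = true)
    (hsound : ∀ v, seen.getD v false = true → Relation.ReflTransGen (pvR n edge) 0 v)
    (hclosed : ∀ u, seen.getD u false = true → ∀ v, pvR n edge u v → seen.getD v false = true) :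
    ((count == n : Bool) = true) ↔ ∀ v < n, Relation.ReflTransGen (pvR n edge) 0 v := by
  constructor
  · intro h v hv
    have : count = n := by simpa using h
    exact hsound v (count_full_all (by omega) (by omega))
  · intro h
    have hreach : ∀ v, Relation.ReflTransGen (pvR n edge) 0 v → seen.getD v false = true := by
      intro v hrt
      induction hrt with
      | refl => exact h0
      | tail _ he ih => exact hclosed _ ih _ he
    have : seen.count true = seen.length :=
      all_count_full (fun v hv => hreach v (h v (by omega)))
    simp [hcount, this, hlen]

theorem pvBfs_iff {n : Nat} {edge : Nat → Nat → Bool} :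
    ∀ fuel (seen : List Bool) (frontier : List Nat) (count : Nat),
    pvInvB n edge seen frontier count → n - count ≤ fuel →
    (pvBfs n edge fuel seen frontier count = true ↔
      ∀ v < n, Relation.ReflTransGen (pvR n edge) 0 v) := by
  intro fuel
  induction fuel with
  | zero =>
    intro seen frontier count ⟨hlen, hcount, h0, hfr, hsound, hclosed⟩ hfu
    have hcle : seen.count true ≤ n := hlen ▸ List.count_le_length
    have hceq : count = n := by omega
    simp only [pvBfs]
    constructor
    · intro _ v hv
      exact hsound v (count_full_all (by omega) (by omega))
    · intro _
      simp [hceq]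
  | succ fuel ih =>
    intro seen frontier count hinv hfu
    obtain ⟨hlen, hcount, h0, hfr, hsound, hclosed⟩ := hinv
    match frontier with
    | [] =>
      rw [pvBfs_nil]
      exact closed_iff hlen hcount h0 hsound
        (fun u hu v hv => hclosed u hu (by simp) v hv)
    | f :: fs =>
      have hstep : pvBfs n edge (fuel + 1) seen (f :: fs) count =
          pvBfs n edge fuel
            ((pvNewFrontier n edge seen (f :: fs)).foldl (fun s v => s.set v true) seen)
            (pvNewFrontier n edge seen (f :: fs))
            (count + (pvNewFrontier n edge seen (f :: fs)).length) := rfl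
      rw [hstep]
      set new := pvNewFrontier n edge seen (f :: fs) with hnew
      have hmem : ∀ v, v ∈ new ↔
          v < n ∧ seen.getD v false = false ∧ ∃ u ∈ f :: fs, edge u v = true := by
        intro v
        rw [hnew]
        exact pvNewFrontier_mem
      have hnd : new.Nodup := hnew ▸ pvNewFrontier_nodup n edge seen (f :: fs)
      have hfresh : ∀ v ∈ new, seen.getD v false = false := fun v hv => ((hmem v).mp hv).2.1
      have hltn : ∀ v ∈ new, v < seen.length := fun v hv => hlen ▸ ((hmem v).mp hv).1
      obtain ⟨c1, c2, c3⟩ := foldl_set_true new seen hnd hfresh hltn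
      by_cases hne : new = []
      · rw [hne]
        simp only [List.foldl_nil, List.length_nil, Nat.add_zero, pvBfs_nil]
        apply closed_iff hlen hcount h0 hsound
        intro u hu v hv
        by_cases hufr : u ∈ f :: fs
        · by_contra hvn
          have hvf : seen.getD v false = false := by
            cases hsv : seen.getD v false
            · rfl
            · exact absurd hsv hvn
          have : v ∈ new := (hmem v).mpr ⟨hv.1, hvf, ⟨u, hufr, hv.2⟩⟩
          rw [hne] at this
          cases this
        · exact hclosed u hu hufr v hv
      · have hsound' : ∀ v, (new.foldl (fun s v => s.set v true) seen).getD v false = true →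
            Relation.ReflTransGen (pvR n edge) 0 v := by
          intro v hv
          rcases (c3 v).mp hv with h | h
          · exact hsound v h
          · obtain ⟨hvlt, _, u, hu, he⟩ := (hmem v).mp h
            exact Relation.ReflTransGen.tail (hsound u (hfr u hu)) ⟨hvlt, he⟩
        have hinv' : pvInvB n edge (new.foldl (fun s v => s.set v true) seen) new
            (count + new.length) := by
          refine ⟨by rw [c2]; exact hlen, by rw [c1, hcount], ?_, ?_, hsound', ?_⟩
          · exact (c3 0).mpr (Or.inl h0)
          · exact fun u hu => (c3 u).mpr (Or.inr hu)
          · intro u hu hun v hv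
            have huo : seen.getD u false = true := by
              rcases (c3 u).mp hu with h | h
              · exact h
              · exact absurd h hun
            apply (c3 v).mpr
            by_cases hsv : seen.getD v false = true
            · exact Or.inl hsv
            · by_cases hufr : u ∈ f :: fs
              · refine Or.inr ((hmem v).mpr ⟨hv.1, ?_, ⟨u, hufr, hv.2⟩⟩)
                cases h : seen.getD v false
                · rfl
                · exact absurd h hsv
              · exact Or.inl (hclosed u huo hufr v hv)
        have hcle : seen.count true ≤ n := hlen ▸ List.count_le_length
        have hbound : n - (count + new.length) ≤ fuel := by
          have : 0 < new.length := List.length_pos_of_ne_nil hne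
          omega
        exact ih (new.foldl (fun s v => s.set v true) seen) new (count + new.length) hinv' hbound

theorem pvReachesAll_iff {n : Nat} {edge : Nat → Nat → Bool} (hn : 1 ≤ n) :
    pvReachesAll n edge = true ↔ ∀ v < n, Relation.ReflTransGen (pvR n edge) 0 v := by
  unfold pvReachesAll
  have hlen0 : ((List.replicate n false).set 0 true).length = n := by simp
  have hgd : ∀ v, ((List.replicate n false).set 0 true).getD v false =
      if v = 0 then true else false := by
    intro v
    by_cases hv : v = 0
    · subst hv
      rw [pvset_getD_self _ _ _ (by simpa using hn)]
      simp
    · rw [pvset_getD_ne _ _ _ (fun h => hv h.symm), pvrep_getD]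
      simp [hv]
  apply pvBfs_iff
  · refine ⟨hlen0, ?_, by rw [hgd]; simp, ?_, ?_, ?_⟩
    · rw [count_set_true _ 0 (by simpa using hn) (pvrep_getD n 0 false)]
      simp [List.count_replicate]
    · intro u hu
      simp at hu
      subst hu
      rw [hgd]; simp
    · intro v hv
      rw [hgd] at hv
      split_ifs at hv with h
      subst h
      exact Relation.ReflTransGen.refl
    · intro u hu hun v hv
      rw [hgd] at hu
      split_ifs at hu with h
      subst h
      exact absurd (by simp) hun
  · have : ((List.replicate n false).set 0 true).count true ≤ n :=
      le_trans List.count_le_length (le_of_eq hlen0)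
    omega

-- translate backward BFS reachability into forward paths into 0
theorem rt_bwd_iff {M : List (List Int)} {v : Nat} (h0 : 0 < M.length) (hv : v < M.length) :
    Relation.ReflTransGen (pvR M.length (fun u v => !(pvGetM M v u == 0))) 0 v ↔
      Relation.ReflTransGen (pvE M) v 0 := by
  constructor
  · intro h
    have key : ∀ w, Relation.ReflTransGen (pvR M.length (fun u v => !(pvGetM M v u == 0))) 0 w →
        Relation.ReflTransGen (pvE M) w 0 ∧ w < M.length := by
      intro w hw
      induction hw with
      | refl => exact ⟨Relation.ReflTransGen.refl, h0⟩
      | tail _ he ih =>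
        exact ⟨Relation.ReflTransGen.head ⟨ih.2, by simpa using he.2⟩ ih.1, he.1⟩
    exact (key v h).1
  · have key2 : ∀ w, Relation.ReflTransGen (pvE M) w 0 →
        Relation.ReflTransGen (pvR M.length (fun u v => !(pvGetM M v u == 0))) 0 w := by
      intro w h
      induction h using Relation.ReflTransGen.head_induction_on with
      | refl => exact Relation.ReflTransGen.refl
      | head hac _ ih =>
        exact Relation.ReflTransGen.tail ih ⟨pvE_src_lt hac.2, by simpa using hac.2⟩
    exact key2 v

-- the master bridge between the two characterizations
theorem pvBridge (M : List (List Int)) :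
    (∀ i j, i < M.length → j < M.length → Relation.TransGen (pvE M) i j) ↔
      (M.length = 0 ∨ (M.length = 1 ∧ pvGetM M 0 0 ≠ 0) ∨
        (2 ≤ M.length ∧ (∀ v < M.length, Relation.ReflTransGen (pvE M) 0 v) ∧
          (∀ v < M.length, Relation.ReflTransGen (pvE M) v 0))) := by
  constructor
  · intro h
    by_cases h0 : M.length = 0
    · exact Or.inl h0
    by_cases h1 : M.length = 1
    · refine Or.inr (Or.inl ⟨h1, ?_⟩)
      have ht := h 0 0 (by omega) (by omega)
      obtain ⟨b, hb, _⟩ := Relation.TransGen.head'_iff.mp ht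
      have hb0 : b = 0 := by have := hb.1; omega
      subst hb0
      exact hb.2
    · refine Or.inr (Or.inr ⟨by omega, ?_, ?_⟩)
      · exact fun v hv => (h 0 v (by omega) hv).to_reflTransGen
      · exact fun v hv => (h v 0 hv (by omega)).to_reflTransGen
  · intro h i j hi hj
    rcases h with h | ⟨h1, h2⟩ | ⟨h1, h2, h3⟩
    · omega
    · have : i = 0 ∧ j = 0 := by omega
      obtain ⟨rfl, rfl⟩ := this
      exact Relation.TransGen.single ⟨by omega, h2⟩
    · have rt_ij : ∀ a b, a < M.length → b < M.length →
          Relation.ReflTransGen (pvE M) a b :=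
        fun a b ha hb => Relation.ReflTransGen.trans (h3 a ha) (h2 b hb)
      by_cases hij : i = j
      · subst hij
        set w := if i = 0 then 1 else 0 with hw
        have hwlt : w < M.length := by rw [hw]; split_ifs <;> omega
        have hwne : w ≠ i := by rw [hw]; split_ifs with h <;> omega
        have t1 : Relation.TransGen (pvE M) i w := by
          rcases Relation.reflTransGen_iff_eq_or_transGen.mp (rt_ij i w hi hwlt) with he | ht
          · exact absurd he hwne
          · exact ht
        have t2 : Relation.TransGen (pvE M) w i := by
          rcases Relation.reflTransGen_iff_eq_or_transGen.mp (rt_ij w i hwlt hi) with he | ht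
          · exact absurd he.symm hwne
          · exact ht
        exact Relation.TransGen.trans t1 t2
      · rcases Relation.reflTransGen_iff_eq_or_transGen.mp (rt_ij i j hi hj) with he | ht
        · exact absurd he.symm hij
        · exact ht

-- fc in terms of paths
theorem fc_true_iff {M : List (List Int)} (hPre : Pre_fc M) :
    fc M = true ↔ ∀ i j, i < M.length → j < M.length → Relation.TransGen (pvE M) i j := by
  unfold fc
  simp only [List.all_eq_true, List.mem_range, Bool.not_eq_eq_eq_not, Bool.not_false, beq_iff_eq]
  constructor
  · intro h i j hi hj
    exact (pvFW_iff hPre hi hj).mp (by simpa using h i hi j hj)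
  · intro h i hi j hj
    simpa using (pvFW_iff hPre hi hj).mpr (h i j hi hj)

-- fc_alt in terms of paths
theorem fc_alt_true_iff (M : List (List Int)) :
    fc_alt M = true ↔
      (M.length = 0 ∨ (M.length = 1 ∧ pvGetM M 0 0 ≠ 0) ∨
        (2 ≤ M.length ∧ (∀ v < M.length, Relation.ReflTransGen (pvE M) 0 v) ∧
          (∀ v < M.length, Relation.ReflTransGen (pvE M) v 0))) := by
  unfold fc_alt
  by_cases h0 : M.length = 0
  · simp [h0]
  · by_cases h1 : M.length = 1
    · simp only [h0, h1, if_false, if_true, if_pos rfl]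
      simp [h1, h0]
    · have h2 : 2 ≤ M.length := by omega
      simp only [h0, h1, if_false, Bool.and_eq_true]
      rw [pvReachesAll_iff (by omega), pvReachesAll_iff (by omega)]
      have hfwd : ∀ u v, pvR M.length (fun u v => !(pvGetM M u v == 0)) u v ↔ pvE M u v := by
        intro u v; simp [pvR, pvE]
      have efwd : ∀ v, Relation.ReflTransGen (pvR M.length (fun u v => !(pvGetM M u v == 0))) 0 v ↔
          Relation.ReflTransGen (pvE M) 0 v := by
        intro v
        constructor
        · exact Relation.ReflTransGen.mono (fun a b h => (hfwd a b).mp h)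
        · exact Relation.ReflTransGen.mono (fun a b h => (hfwd a b).mpr h)
      constructor
      · intro ⟨ha, hb⟩
        refine Or.inr (Or.inr ⟨h2, fun v hv => (efwd v).mp (ha v hv),
          fun v hv => (rt_bwd_iff (by omega) hv).mp (hb v hv)⟩)
      · intro h
        rcases h with h | ⟨hl, _⟩ | ⟨_, hf, hb⟩
        · exact h.elim
        · exact hl.elim
        · exact ⟨fun v hv => (efwd v).mpr (hf v hv),
            fun v hv => (rt_bwd_iff (by omega) hv).mpr (hb v hv)⟩

-- ===== VERDICT (by name: the statement is the Claim_ definition above) =====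
theorem fc_spec : Claim_equal_fc := by
  intro M _ hPre
  unfold Spec_fc
  apply Bool.coe_iff_coe.mp
  rw [fc_true_iff hPre, fc_alt_true_iff, pvBridge]
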